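-- pv_equiv track=rewrite | github.com/SDNNetSim/FUSION | fusion/modules/spectrum/last_fit.py | _count_contiguous_blocks
-- ===== SOURCE A (Python) =====
-- def _count_contiguous_blocks(core_array: list) -> int:
--     """Count the number of contiguous free blocks in a core array."""
--     blocks = 0
--     in_block = False
--
--     for slot in core_array:
--         if slot == 0:  # Free slot
--             if not in_block:
--                 blocks += 1
--                 in_block = True
--         else:  # Occupied slot
--             in_block = False
--
--     return blocks
-- ===== SOURCE B (Python) =====
-- def _count_contiguous_blocks(core_array: list) -> int:
--     """Count the number of contiguous free blocks in a core array.
--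
--     Counting identity: each zero run of length L has L zeros and L-1
--     adjacent zero-zero pairs, so #runs = #zeros - #adjacent zero pairs.
--     """
--     zeros = sum(1 for x in core_array if x == 0)
--     pairs = sum(1 for a, b in zip(core_array, core_array[1:])
--                 if a == 0 and b == 0)
--     return zeros - pairs
-- ===== Notes on version B (the rewrite author's own statement) =====
-- stated objective: alternative
-- what changed: Replaces A's stateful run-detection loop with an inclusion-exclusion counting identity: the number of zero runs equals the count of zeros minus the count of adjacent zero-zero pairs, computed as two independent counts with no flag or run detection.
import Mathlib
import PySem

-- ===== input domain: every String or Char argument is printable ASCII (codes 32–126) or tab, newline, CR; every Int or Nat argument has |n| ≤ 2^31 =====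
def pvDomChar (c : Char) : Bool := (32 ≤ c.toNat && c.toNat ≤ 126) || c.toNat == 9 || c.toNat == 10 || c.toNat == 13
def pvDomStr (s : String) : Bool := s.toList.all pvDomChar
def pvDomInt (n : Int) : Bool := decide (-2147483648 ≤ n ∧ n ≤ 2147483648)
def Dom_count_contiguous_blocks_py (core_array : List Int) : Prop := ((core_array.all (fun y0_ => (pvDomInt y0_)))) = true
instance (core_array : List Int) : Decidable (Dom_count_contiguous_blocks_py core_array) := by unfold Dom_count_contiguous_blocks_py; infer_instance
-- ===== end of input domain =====

-- B replaces A's stateful run-detection loop with a counting identity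
-- (#runs = #zeros - #adjacent zero-zero pairs), two independent counts: alternative.

-- ===== PORT A =====
-- for slot in core_array with state (blocks, in_block)
def count_contiguous_blocks_py (core_array : List Int) : Int :=
  (core_array.foldl
    (fun (st : Int × Bool) slot =>
      if slot = 0 then
        (if !st.2 then (st.1 + 1, true) else st)
      else
        (st.1, false))
    (0, false)).1

-- ===== PORT B =====
-- zeros = sum(1 for x in core_array if x == 0)
-- pairs = sum(1 for a, b in zip(core_array, core_array[1:]) if a == 0 and b == 0)
-- return zeros - pairs
def count_contiguous_blocks_py_alt (core_array : List Int) : Int :=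
  let zeros : Int := core_array.foldl (fun acc x => if x = 0 then acc + 1 else acc) 0
  let pairs : Int := (List.zip core_array (PySem.List.slice core_array (some 1) none)).foldl
    (fun acc p => if p.1 = 0 ∧ p.2 = 0 then acc + 1 else acc) 0
  zeros - pairs

-- ===== PRECONDITION & SPEC =====
def Spec_count_contiguous_blocks_py (core_array : List Int) (out : Int) : Prop := out = count_contiguous_blocks_py_alt core_array
instance (core_array : List Int) (out : Int) : Decidable (Spec_count_contiguous_blocks_py core_array out) := by unfold Spec_count_contiguous_blocks_py; infer_instance

-- ===== CLAIM (what is proved, stated in full; the proofs are below) =====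
def Claim_equal_count_contiguous_blocks_py : Prop := ∀ (core_array : List Int), Dom_count_contiguous_blocks_py core_array → Spec_count_contiguous_blocks_py core_array (count_contiguous_blocks_py core_array)

-- ===== LEMMAS AND PROOFS =====

-- number of zeros in xs
def ccbZ : List Int → Int
  | [] => 0
  | x :: r => (if x = 0 then 1 else 0) + ccbZ r

-- number of adjacent zero-zero boundaries in prev::xs, prev zero iff b
def ccbP : Bool → List Int → Int
  | _, [] => 0
  | b, x :: r => (if b ∧ x = 0 then 1 else 0) + ccbP (decide (x = 0)) r

theorem ccbZ_fold (xs : List Int) : ∀ acc : Int,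
    xs.foldl (fun acc x => if x = 0 then acc + 1 else acc) acc = acc + ccbZ xs := by
  induction xs with
  | nil => intro acc; simp [ccbZ]
  | cons x r ih =>
    intro acc
    by_cases hx : x = 0 <;> simp [List.foldl, ccbZ, hx, ih] <;> ring

theorem ccbP_fold (xs : List Int) : ∀ (x : Int) (acc : Int),
    (List.zip (x :: xs) xs).foldl
      (fun acc p => if p.1 = 0 ∧ p.2 = 0 then acc + 1 else acc) acc
    = acc + ccbP (decide (x = 0)) xs := by
  induction xs with
  | nil => intro x acc; simp [ccbP]
  | cons y r ih =>
    intro x acc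
    rw [show (x :: y :: r).zip (y :: r) = (x, y) :: (y :: r).zip r from rfl,
        List.foldl_cons]
    by_cases hx : x = 0 <;> by_cases hy : y = 0 <;>
      simp only [hx, hy, and_self, and_true, and_false, if_true, if_false,
        ite_true, ite_false, not_true, not_false_iff, reduceIte, ih, ccbP,
        decide_true, decide_false] <;> (try simp) <;> (try ring)

-- A's flag loop computes n + ccbZ xs - ccbP b xs
theorem ccbA_fold (xs : List Int) : ∀ (b : Bool) (n : Int),
    (xs.foldl
      (fun (st : Int × Bool) slot =>
        if slot = 0 then
          (if !st.2 then (st.1 + 1, true) else st)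
        else
          (st.1, false))
      (n, b)).1 = n + ccbZ xs - ccbP b xs := by
  induction xs with
  | nil => intro b n; simp [ccbZ, ccbP]
  | cons x r ih =>
    intro b n
    rw [List.foldl_cons]
    by_cases hx : x = 0 <;> cases b <;>
      simp only [hx, Bool.not_false, Bool.not_true, if_true, if_false,
        ite_true, ite_false, reduceIte, ih, ccbZ, ccbP, decide_true,
        decide_false, and_true, and_false, true_and, false_and] <;> (try simp) <;> (try ring)

-- ===== VERDICT (by name: the statement is the Claim_ definition above) =====
theorem count_contiguous_blocks_py_spec : Claim_equal_count_contiguous_blocks_py := by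
  intro xs _
  unfold Spec_count_contiguous_blocks_py count_contiguous_blocks_py count_contiguous_blocks_py_alt
  cases xs with
  | nil => rfl
  | cons x r =>
    have hslice : PySem.List.slice (x :: r) (some 1) none = r := by
      simp [PySem.List.slice_from]
    rw [hslice]
    simp only [ccbA_fold, ccbZ_fold, ccbP_fold, ccbZ, ccbP]
    simp
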